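-- pv_equiv track=rewrite | github.com/SpionSkummis/Advent-of-Code-2018 | Erik/Day7.py | p2findUnblocked
-- ===== SOURCE A (Python) =====
-- def p2findUnblocked(mainDict, orderList, startedList):
--     resultList = []
--     removeSet = set()
--     for key in mainDict:
--         if(all(elem in orderList for elem in mainDict[key])):
--             resultList.append(key)
--
--     for i in range(0,len(resultList)):
--         if(resultList[i] in orderList):
--             removeSet.add(resultList[i])
--     for i in range(0,len(resultList)):
--         if(resultList[i] in startedList):
--             removeSet.add(resultList[i])
--
--     for elem in removeSet:
--         resultList.remove(elem)
--
--     resultList.sort()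
--     return resultList
-- ===== SOURCE B (Python) =====
-- def p2findUnblocked(mainDict, orderList, startedList):
--     done = set(orderList)
--     busy = set(startedList)
--     return [k for k in sorted(mainDict)
--             if k not in done and k not in busy
--             and all(d in done for d in mainDict[k])]
-- ===== Notes on version B (the rewrite author's own statement) =====
-- stated objective: faster
-- what changed: Replaced A's four-phase pipeline (over-collect candidates, two index passes filling a removeSet, a list.remove mutation loop, then sort) by sorting the keys once and doing a single filtering pass with the complete predicate, using prebuilt sets for all membership tests.
import Mathlib
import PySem

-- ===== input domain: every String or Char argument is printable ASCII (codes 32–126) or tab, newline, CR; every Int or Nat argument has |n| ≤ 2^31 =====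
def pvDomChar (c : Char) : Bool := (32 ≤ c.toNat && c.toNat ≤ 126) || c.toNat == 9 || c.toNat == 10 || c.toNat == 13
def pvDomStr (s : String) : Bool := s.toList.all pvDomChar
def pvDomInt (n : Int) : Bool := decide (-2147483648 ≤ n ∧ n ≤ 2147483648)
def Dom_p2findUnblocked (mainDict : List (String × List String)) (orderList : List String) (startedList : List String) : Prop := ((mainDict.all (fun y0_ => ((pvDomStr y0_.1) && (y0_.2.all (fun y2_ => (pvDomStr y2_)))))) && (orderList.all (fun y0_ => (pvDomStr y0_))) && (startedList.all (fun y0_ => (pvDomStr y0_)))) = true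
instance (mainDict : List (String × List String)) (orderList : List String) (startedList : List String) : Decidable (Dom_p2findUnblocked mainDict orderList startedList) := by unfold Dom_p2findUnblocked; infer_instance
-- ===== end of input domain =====

-- B replaces A's four phases (over-collect, two removeSet passes, list.remove loop, sort)
-- by one sort of the keys followed by a single filtering pass with the full predicate over prebuilt sets
-- (objective: faster; a timing run measured B faster at the largest sizes).

-- dict-convention glue shared by both ports: key iteration (distinct keys, insertion order)
-- and lookup (first match) on the association list that represents the Python dict.
def pvKeys (d : List (String × List String)) : List String :=
  PySem.List.dedup (d.map Prod.fst)

def pvGetD (d : List (String × List String)) (k : String) : List String :=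
  match d with
  | [] => []
  | (a, v) :: t => if a == k then v else pvGetD t k

-- ===== PORT A =====
def p2findUnblocked (mainDict : List (String × List String)) (orderList : List String) (startedList : List String) : List String :=
  -- resultList = []; for key in mainDict: if all(elem in orderList ...): resultList.append(key)
  let resultList := (pvKeys mainDict).foldl
    (fun acc key => if (pvGetD mainDict key).all (fun elem => orderList.contains elem) then acc ++ [key] else acc) []
  -- removeSet = set(); two index loops adding resultList[i]
  let removeSet := (PySem.List.pyRange 0 (PySem.List.len resultList) 1).foldl
    (fun s i => if orderList.contains (PySem.List.pyGetD resultList i "") then PySem.Set.add s (PySem.List.pyGetD resultList i "") else s)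
    PySem.Set.empty
  let removeSet := (PySem.List.pyRange 0 (PySem.List.len resultList) 1).foldl
    (fun s i => if startedList.contains (PySem.List.pyGetD resultList i "") then PySem.Set.add s (PySem.List.pyGetD resultList i "") else s)
    removeSet
  -- for elem in removeSet: resultList.remove(elem)   (every elem is in resultList, so remove? never fails;
  -- .getD acc only makes the step total)
  let resultList := removeSet.foldl (fun acc elem => (PySem.List.remove? acc elem).getD acc) resultList
  PySem.List.sorted resultList (fun x => x) false

-- ===== PORT B =====
def p2findUnblocked_alt (mainDict : List (String × List String)) (orderList : List String) (startedList : List String) : List String :=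
  let done : PySem.Set String := PySem.Set.ofList orderList
  let busy : PySem.Set String := PySem.Set.ofList startedList
  (PySem.List.sorted (pvKeys mainDict) (fun x => x) false).filter
    (fun k => !(PySem.Set.contains done k) && !(PySem.Set.contains busy k)
      && (pvGetD mainDict k).all (fun d => PySem.Set.contains done d))

-- ===== PRECONDITION & SPEC =====
def Spec_p2findUnblocked (mainDict : List (String × List String)) (orderList : List String) (startedList : List String) (out : List String) : Prop := out = p2findUnblocked_alt mainDict orderList startedList
instance (mainDict : List (String × List String)) (orderList : List String) (startedList : List String) (out : List String) : Decidable (Spec_p2findUnblocked mainDict orderList startedList out) := by unfold Spec_p2findUnblocked; infer_instance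

-- ===== CLAIM (what is proved, stated in full; the proofs are below) =====
def Claim_equal_p2findUnblocked : Prop := ∀ (mainDict : List (String × List String)) (orderList : List String) (startedList : List String), Dom_p2findUnblocked mainDict orderList startedList → Spec_p2findUnblocked mainDict orderList startedList (p2findUnblocked mainDict orderList startedList)

-- ===== LEMMAS AND PROOFS =====

theorem mem_foldl_addIf (y : String) (c : String → Bool) :
    ∀ (l : List String) (s : PySem.Set String),
      (y ∈ l.foldl (fun s x => if c x then PySem.Set.add s x else s) s ↔ y ∈ s ∨ (y ∈ l ∧ c y = true)) := by
  intro l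
  induction l with
  | nil => intro s; simp
  | cons x t ih =>
    intro s
    simp only [List.foldl_cons, ih, List.mem_cons]
    by_cases hx : c x = true
    · simp [hx, PySem.Set.mem_add]
      constructor
      · rintro (⟨h | rfl⟩ | h) <;> tauto
      · rintro (h | ⟨rfl | h, hc⟩) <;> tauto
    · simp [hx]
      constructor
      · rintro (h | h)
        · tauto
        · exact Or.inr ⟨Or.inr h.1, h.2⟩
      · rintro (h | ⟨rfl | h, hc⟩)
        · tauto
        · exact absurd hc hx
        · tauto
  
theorem removeFold :
    ∀ (ys acc : List String), acc.Nodup →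
      ys.foldl (fun acc elem => (PySem.List.remove? acc elem).getD acc) acc
        = acc.filter (fun x => !(ys.contains x)) := by
  intro ys
  induction ys with
  | nil => intro acc h; simp
  | cons e t ih =>
    intro acc hacc
    have hstep : (PySem.List.remove? acc e).getD acc = acc.filter (fun x => !(x == e)) := by
      by_cases he : e ∈ acc
      · rw [PySem.List.remove?_eq_some_erase acc e he, Option.getD_some, hacc.erase_eq_filter]
        simp [bne]
      · rw [(PySem.List.remove?_eq_none_iff acc e).2 he, Option.getD_none]
        refine (List.filter_eq_self.2 ?_).symm
        intro a ha
        have hne : a ≠ e := fun h => he (h ▸ ha)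
        simp [hne]
    simp only [List.foldl_cons, hstep]
    rw [ih _ (hacc.filter _), List.filter_filter]
    apply List.filter_congr
    intro x _
    simp only [List.contains_cons, Bool.not_or]
    by_cases hxe : x = e
    · simp [hxe]
    · simp [Bool.and_comm]

theorem contains_ofList_eq (l : List String) (k : String) :
    PySem.Set.contains (PySem.Set.ofList l) k = l.contains k := by
  rw [PySem.Set.contains_eq_listContains]
  by_cases h : k ∈ l
  · simp [h, PySem.Set.mem_ofList]
  · simp [h, (PySem.Set.mem_ofList l k).not.2 h]

theorem p2findUnblocked_spec : Claim_equal_p2findUnblocked := by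
  intro mainDict orderList startedList _
  unfold Spec_p2findUnblocked p2findUnblocked p2findUnblocked_alt
  simp only []
  have hP := PySem.List.foldl_append_if (fun key => (pvGetD mainDict key).all (fun elem => orderList.contains elem)) (fun x => x) (pvKeys mainDict) []
  simp only [List.nil_append] at hP
  rw [hP]
  simp only [List.map_id']
  set R := List.filter (fun key => (pvGetD mainDict key).all fun elem => orderList.contains elem) (pvKeys mainDict) with hR
  rw [PySem.List.foldl_pyRange_zero_pyGetD R "" (fun s x => if orderList.contains x = true then PySem.Set.add s x else s) PySem.Set.empty]
  rw [PySem.List.foldl_pyRange_zero_pyGetD R "" (fun s x => if startedList.contains x = true then PySem.Set.add s x else s)]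
  set RS := R.foldl (fun s x => if startedList.contains x = true then PySem.Set.add s x else s)
    (R.foldl (fun s x => if orderList.contains x = true then PySem.Set.add s x else s) PySem.Set.empty) with hRS
  have hndkeys : (pvKeys mainDict).Nodup := PySem.List.nodup_dedup _
  have hndR : R.Nodup := hndkeys.filter _
  rw [removeFold RS R hndR]
  have hmem : ∀ y, y ∈ RS ↔ y ∈ R ∧ (orderList.contains y = true ∨ startedList.contains y = true) := by
    intro y
    rw [hRS, mem_foldl_addIf, mem_foldl_addIf]
    simp only [PySem.Set.empty, List.not_mem_nil, false_or]
    tauto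
  have hfc : R.filter (fun x => !(List.contains RS x))
      = R.filter (fun x => !(orderList.contains x) && !(startedList.contains x)) := by
    apply List.filter_congr
    intro x hx
    have h1 : List.contains RS x = (orderList.contains x || startedList.contains x) := by
      rw [Bool.eq_iff_iff, List.contains_iff_mem, hmem x, Bool.or_eq_true]
      tauto
    rw [h1, Bool.not_or]
  rw [hfc, hR, List.filter_filter]
  apply PySem.List.sorted_eq_of_perm_of_pairwise_lt
  · refine ((PySem.List.sorted_perm (pvKeys mainDict) (fun x => x) false).filter _).trans ?_
    have heq : ∀ x ∈ pvKeys mainDict,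
        (fun k => !(PySem.Set.ofList orderList).contains k && !(PySem.Set.ofList startedList).contains k
          && (pvGetD mainDict k).all fun d => (PySem.Set.ofList orderList).contains d) x
        = (fun a => (!orderList.contains a && !startedList.contains a)
            && ((pvGetD mainDict a).all fun elem => orderList.contains elem)) x := by
      intro x _
      simp only [contains_ofList_eq]
    rw [List.filter_congr heq]
  · have hple := PySem.List.sorted_pairwise (pvKeys mainDict) (fun x => x)
    have hnd2 : (PySem.List.sorted (pvKeys mainDict) (fun x => x)).Nodup :=
      ((PySem.List.sorted_perm (pvKeys mainDict) (fun x => x) false).nodup_iff).2 hndkeys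
    exact ((hple.and hnd2).imp (fun h => lt_of_le_of_ne h.1 h.2)).filter _
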